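-- pv_equiv track=rewrite | github.com/ma1112/codejam2018 | ant.py | getResultOld
-- ===== SOURCE A (Python) =====
-- import operator
--
-- def getResultOld(ants):
--     possibilities = {}
--     for ant in ants:
--
--         newPossibilities = {ant:1}
--
--         for weight, length in possibilities.items():
--             if weight > ant*6: continue
--             newWeight = weight + ant
--             newLength = length+1
--             if newWeight not in newPossibilities or newPossibilities[newWeight] < newLength:
--                 newPossibilities[newWeight] = newLength
--
--         for newWeight , newLength in newPossibilities.items():
--             if newWeight not in possibilities or possibilities[newWeight] < newLength:
--                 possibilities[newWeight] = newLength
--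
--
--     return possibilities[max(possibilities.items(), key=operator.itemgetter(1))[0]]
-- ===== SOURCE B (Python) =====
-- def _extend(ant, best):
--     # entries for stack sizes 2..: from each best[k-1], optionally improve/create best[k]
--     if len(best) == 1:
--         return [best[0] + ant] if best[0] <= 6 * ant else []
--     head = min(best[1], best[0] + ant) if best[0] <= 6 * ant else best[1]
--     return [head] + _extend(ant, best[1:])
--
-- def getResultOld(ants):
--     best = []  # best[k] = minimal total weight of a valid stack of k+1 ants
--     for ant in ants:
--         if not best:
--             best = [ant]
--         else:
--             best = [min(best[0], ant)] + _extend(ant, best)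
--     return len(best)
-- ===== Notes on version B (the rewrite author's own statement) =====
-- stated objective: faster
-- what changed: Replaced the dict of all achievable subset weights (worst-case exponentially many keys, each ant loops over all of them) by an O(n^2) DP list best[k] = minimal total weight of a valid stack of k+1 ants, updated in place per ant; the answer is len(best).
import Mathlib
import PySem

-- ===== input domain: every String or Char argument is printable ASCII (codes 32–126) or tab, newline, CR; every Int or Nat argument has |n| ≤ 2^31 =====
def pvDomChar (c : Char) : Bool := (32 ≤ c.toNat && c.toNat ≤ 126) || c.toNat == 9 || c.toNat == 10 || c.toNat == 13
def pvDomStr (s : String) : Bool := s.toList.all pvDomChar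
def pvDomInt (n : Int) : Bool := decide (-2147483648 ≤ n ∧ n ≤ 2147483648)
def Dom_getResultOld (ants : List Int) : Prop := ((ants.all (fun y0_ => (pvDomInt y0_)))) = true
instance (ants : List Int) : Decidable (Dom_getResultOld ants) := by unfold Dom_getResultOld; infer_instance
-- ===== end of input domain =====

-- B replaces A's dict of all achievable subset weights (worst-case exponentially many keys)
-- by a per-stack-size minimal-weight DP list; equivalence of the RETURN values is proved below.

-- ===== PORT A =====
-- 'if newWeight not in d or d[newWeight] < newLength: d[newWeight] = newLength';
-- getD's default 0 is only read when the key is absent, where the first disjunct already decides.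
def updA (p : PySem.Dict Int Int) (w l : Int) : PySem.Dict Int Int :=
  if !p.contains w || decide (p.getD w 0 < l) then p.insert w l else p
def stepA (poss : PySem.Dict Int Int) (ant : Int) : PySem.Dict Int Int :=
  let newP := poss.items.foldl
    (fun np wl => if wl.1 > ant * 6 then np else updA np (wl.1 + ant) (wl.2 + 1))
    ((PySem.Dict.empty).insert ant 1)
  newP.items.foldl (fun p wl => updA p wl.1 wl.2) poss

def getResultOld (ants : List Int) : Int :=
  let possibilities := ants.foldl stepA PySem.Dict.empty
  -- max(possibilities.items(), key=itemgetter(1))[0], then possibilities[that key]: the key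
  -- comes from items, so the lookup cannot fail (getD's default 0 is never read);
  -- max() of an empty dict raises ValueError: Pre_ excludes exactly that input.
  match PySem.List.max? possibilities.items (fun wl => wl.2) with
  | some best => possibilities.getD best.1 0
  | none => 0

-- ===== PORT B =====
def extendB (ant : Int) : List Int → List Int
  | [] => []
  | [b] => if b ≤ 6 * ant then [b + ant] else []
  | b :: c :: rest => (if b ≤ 6 * ant then min c (b + ant) else c) :: extendB ant (c :: rest)
def stepB (best : List Int) (ant : Int) : List Int :=
  match best with
  | [] => [ant]
  | b :: rest => min b ant :: extendB ant (b :: rest)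

def getResultOld_alt (ants : List Int) : Int :=
  ((ants.foldl stepB []).length : Int)

-- ===== PRECONDITION & SPEC =====
-- Pre_ excludes only the empty list, on which A raises ValueError (max() of an empty dict).
def Pre_getResultOld (ants : List Int) : Prop := ants ≠ []
instance (ants : List Int) : Decidable (Pre_getResultOld ants) := by unfold Pre_getResultOld; infer_instance
def pvWitness_getResultOld : List Int := [1]


def Spec_getResultOld (ants : List Int) (out : Int) : Prop := out = getResultOld_alt ants
instance (ants : List Int) (out : Int) : Decidable (Spec_getResultOld ants out) := by unfold Spec_getResultOld; infer_instance

-- ===== CLAIM (what is proved, stated in full; the proofs are below) =====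
def Claim_equal_getResultOld : Prop := ∀ (ants : List Int), Dom_getResultOld ants → Pre_getResultOld ants → Spec_getResultOld ants (getResultOld ants)

-- ===== LEMMAS AND PROOFS =====

-- Proof-only model: the list of all achievable (total weight, stack size) pairs of valid stacks
-- over a prefix of the input (an ant may carry a stack of total weight ≤ 6× its own weight).
def achStep (P : List (Int × Int)) (a : Int) : List (Int × Int) :=
  (a, 1) :: P ++ P.filterMap (fun wl => if wl.1 > a * 6 then none else some (wl.1 + a, wl.2 + 1))

-- A's dict maps each achievable weight to the maximal size of a stack of that weight;
-- B's list stores, per stack size, the minimal achievable weight.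
def InvA (d : PySem.Dict Int Int) (P : List (Int × Int)) : Prop :=
  d.keys.Nodup ∧
  (∀ w l, d.get? w = some l → (w, l) ∈ P) ∧
  (∀ w l, (w, l) ∈ P → ∃ l', d.get? w = some l' ∧ l ≤ l')
def MinWt (P : List (Int × Int)) (l w : Int) : Prop :=
  (w, l) ∈ P ∧ ∀ w', (w', l) ∈ P → w ≤ w'

def InvB (best : List Int) (P : List (Int × Int)) : Prop :=
  (∀ (k : Nat) (w : Int), best[k]? = some w → MinWt P ((k : Int) + 1) w) ∧
  (∀ w l, (w, l) ∈ P → 1 ≤ l ∧ l ≤ (best.length : Int))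
lemma get?_updA (p : PySem.Dict Int Int) (w l w' : Int) :
    (updA p w l).get? w' =
      if w' = w then some (match p.get? w with | none => l | some l0 => max l0 l)
      else p.get? w' := by
  unfold updA
  cases hg : p.get? w with
  | none =>
    have hc : p.contains w = false := by
      rw [PySem.Dict.contains_eq_isSome_get?, hg]; rfl
    simp [hc, PySem.Dict.get?_insert]
  | some l0 =>
    have hc : p.contains w = true := by
      rw [PySem.Dict.contains_eq_isSome_get?, hg]; rfl
    have hd : p.getD w 0 = l0 := by
      rw [PySem.Dict.getD_eq_get?_getD, hg]; rfl
    by_cases hlt : l0 < l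
    · simp [hc, hd, hlt, PySem.Dict.get?_insert, max_eq_right (le_of_lt hlt)]
    · have hcond : (!p.contains w || decide (p.getD w 0 < l)) = false := by
        simp [hc, hd, hlt]
      rw [hcond]
      simp only [Bool.false_eq_true, if_false]
      split
      · next h => subst h; rw [hg, max_eq_left (by omega)]
      · rfl
lemma mem_achStep {P : List (Int × Int)} {a w l : Int} :
    (w, l) ∈ achStep P a ↔
      (w = a ∧ l = 1) ∨ (w, l) ∈ P ∨
      ∃ w0 l0, (w0, l0) ∈ P ∧ ¬ w0 > a * 6 ∧ w = w0 + a ∧ l = l0 + 1 := by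
  unfold achStep
  constructor
  · intro h
    rcases List.mem_cons.mp h with heq | h2
    · exact Or.inl ⟨congrArg Prod.fst heq, congrArg Prod.snd heq⟩
    · rcases List.mem_append.mp h2 with h3 | h3
      · exact Or.inr (Or.inl h3)
      · obtain ⟨x, hx, hf⟩ := List.mem_filterMap.mp h3
        by_cases hc : x.1 > a * 6
        · rw [if_pos hc] at hf; cases hf
        · rw [if_neg hc] at hf
          have h4 := Option.some_inj.mp hf
          refine Or.inr (Or.inr ⟨x.1, x.2, hx, hc, (congrArg Prod.fst h4).symm,
            (congrArg Prod.snd h4).symm⟩)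
  · rintro (⟨hw, hl⟩ | h | ⟨w0, l0, hm, hc, hw, hl⟩)
    · exact List.mem_cons.mpr (Or.inl (by rw [hw, hl]))
    · exact List.mem_cons.mpr (Or.inr (List.mem_append.mpr (Or.inl h)))
    · exact List.mem_cons.mpr (Or.inr (List.mem_append.mpr (Or.inr
        (List.mem_filterMap.mpr ⟨(w0, l0), hm, by rw [if_neg hc, hw, hl]⟩))))

lemma nodup_keys_updA {p : PySem.Dict Int Int} (h : p.keys.Nodup) (w l : Int) :
    (updA p w l).keys.Nodup := by
  unfold updA
  split
  · exact PySem.Dict.nodup_keys_insert _ _ _ h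
  · exact h

lemma foldG_nodup {α : Type} (L : List α) (c : α → Prop) [DecidablePred c] (k v : α → Int)
    (d0 : PySem.Dict Int Int) (h : d0.keys.Nodup) :
    (L.foldl (fun p x => if c x then p else updA p (k x) (v x)) d0).keys.Nodup := by
  induction L generalizing d0 with
  | nil => exact h
  | cons x t ih =>
    simp only [List.foldl_cons]
    apply ih
    split
    · exact h
    · exact nodup_keys_updA h _ _

lemma foldG_sound {α : Type} (L : List α) (c : α → Prop) [DecidablePred c] (k v : α → Int)
    (d0 : PySem.Dict Int Int) (w l : Int)
    (h : (L.foldl (fun p x => if c x then p else updA p (k x) (v x)) d0).get? w = some l) :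
    d0.get? w = some l ∨ ∃ x ∈ L, ¬ c x ∧ k x = w ∧ v x = l := by
  induction L generalizing d0 with
  | nil => exact Or.inl h
  | cons x t ih =>
    simp only [List.foldl_cons] at h
    rcases ih _ h with h1 | ⟨y, hy, hcy, hky, hvy⟩
    · by_cases hc : c x
      · rw [if_pos hc] at h1
        exact Or.inl h1
      · rw [if_neg hc] at h1
        rw [get?_updA] at h1
        split at h1
        · next heq =>
          cases hg : d0.get? (k x) with
          | none =>
            rw [hg] at h1
            simp only [Option.some_inj] at h1
            exact Or.inr ⟨x, List.mem_cons_self .., hc, heq.symm, h1⟩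
          | some l0 =>
            rw [hg] at h1
            simp only [Option.some_inj] at h1
            rcases max_choice l0 (v x) with hm | hm
            · rw [hm] at h1
              exact Or.inl (by rw [heq, hg, h1])
            · rw [hm] at h1
              exact Or.inr ⟨x, List.mem_cons_self .., hc, heq.symm, h1⟩
        · exact Or.inl h1
    · exact Or.inr ⟨y, List.mem_cons_of_mem _ hy, hcy, hky, hvy⟩

lemma foldG_mono {α : Type} (L : List α) (c : α → Prop) [DecidablePred c] (k v : α → Int)
    (d0 : PySem.Dict Int Int) (w l : Int) (h : d0.get? w = some l) :
    ∃ l', l ≤ l' ∧ (L.foldl (fun p x => if c x then p else updA p (k x) (v x)) d0).get? w = some l' := by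
  induction L generalizing d0 l with
  | nil => exact ⟨l, le_refl l, h⟩
  | cons x t ih =>
    simp only [List.foldl_cons]
    by_cases hc : c x
    · rw [if_pos hc]
      exact ih _ _ h
    · rw [if_neg hc]
      by_cases hw : w = k x
      · have h1 : (updA d0 (k x) (v x)).get? w = some (max l (v x)) := by
          rw [get?_updA, if_pos hw, ← hw, h]
        obtain ⟨l', hl', hg⟩ := ih _ _ h1
        exact ⟨l', by omega, hg⟩
      · have h1 : (updA d0 (k x) (v x)).get? w = some l := by
          rw [get?_updA, if_neg hw]; exact h
        obtain ⟨l', hl', hg⟩ := ih _ _ h1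
        exact ⟨l', hl', hg⟩

lemma foldG_complete {α : Type} (L : List α) (c : α → Prop) [DecidablePred c] (k v : α → Int)
    (d0 : PySem.Dict Int Int) (x : α) (hx : x ∈ L) (hc : ¬ c x) :
    ∃ l', v x ≤ l' ∧ (L.foldl (fun p x => if c x then p else updA p (k x) (v x)) d0).get? (k x) = some l' := by
  induction L generalizing d0 with
  | nil => cases hx
  | cons y t ih =>
    simp only [List.foldl_cons]
    rcases List.mem_cons.mp hx with rfl | hmem
    · rw [if_neg hc]
      have h1 : (updA d0 (k x) (v x)).get? (k x) = some (match d0.get? (k x) with | none => v x | some l0 => max l0 (v x)) := by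
        rw [get?_updA, if_pos rfl]
      rcases foldG_mono t c k v _ _ _ h1 with ⟨l', hl', hg⟩
      refine ⟨l', ?_, hg⟩
      cases hg0 : d0.get? (k x) <;> rw [hg0] at hl' <;> simp at hl' <;> omega
    · split
      · exact ih _ hmem
      · exact ih _ hmem
lemma second_loop_eq (N d : PySem.Dict Int Int) :
    N.items.foldl (fun p wl => updA p wl.1 wl.2) d
      = N.items.foldl (fun p (wl : Int × Int) => if (fun _ => False) wl then p else updA p wl.1 wl.2) d := by
  have hf : (fun (p : PySem.Dict Int Int) (wl : Int × Int) => updA p wl.1 wl.2)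
      = fun p (wl : Int × Int) => if (fun _ => False) wl then p else updA p wl.1 wl.2 := by
    funext p wl
    simp
  rw [hf]
lemma invA_step {d : PySem.Dict Int Int} {P : List (Int × Int)} (h : InvA d P) (a : Int) :
    InvA (stepA d a) (achStep P a) := by
  obtain ⟨hnd, hA1, hA2⟩ := h
  have hstep : stepA d a =
      (d.items.foldl (fun np wl => if wl.1 > a * 6 then np else updA np (wl.1 + a) (wl.2 + 1))
        ((PySem.Dict.empty).insert a 1)).items.foldl (fun p wl => updA p wl.1 wl.2) d := rfl
  set d1 : PySem.Dict Int Int := (PySem.Dict.empty).insert a 1 with hd1def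
  set N : PySem.Dict Int Int :=
    d.items.foldl (fun np wl => if wl.1 > a * 6 then np else updA np (wl.1 + a) (wl.2 + 1)) d1
    with hNdef
  have hd1get : ∀ w l : Int, d1.get? w = some l ↔ (w = a ∧ l = 1) := by
    intro w l
    rw [hd1def, PySem.Dict.get?_insert, PySem.Dict.get?_empty]
    constructor
    · intro hg; split at hg
      · exact ⟨by assumption, (Option.some_inj.mp hg).symm⟩
      · cases hg
    · rintro ⟨rfl, rfl⟩; rw [if_pos rfl]
  have hd1nd : d1.keys.Nodup := by
    rw [hd1def]
    exact PySem.Dict.nodup_keys_insert _ _ _ (by simp)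
  have hNfold : N = d.items.foldl
      (fun np (wl : Int × Int) => if wl.1 > a * 6 then np else updA np (wl.1 + a) (wl.2 + 1)) d1 := hNdef
  have hNnd : N.keys.Nodup :=
    foldG_nodup d.items (fun wl : Int × Int => wl.1 > a * 6) (fun wl => wl.1 + a) (fun wl => wl.2 + 1) d1 hd1nd
  have hres : stepA d a = N.items.foldl (fun p wl => updA p wl.1 wl.2) d := hstep
  rw [hres, second_loop_eq]
  refine ⟨foldG_nodup _ _ _ _ _ hnd, ?_, ?_⟩
  · -- soundness
    intro w l hget
    rcases foldG_sound _ _ _ _ _ _ _ hget with hold | ⟨wl, hmem, _, hk, hv⟩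
    · exact mem_achStep.mpr (Or.inr (Or.inl (hA1 _ _ hold)))
    · have hwl : wl = (w, l) := Prod.ext hk hv
      subst hwl
      have hNget : N.get? w = some l := PySem.Dict.get?_of_mem_items N hmem hNnd
      rw [hNfold] at hNget
      rcases foldG_sound _ _ _ _ _ _ _ hNget with h1 | ⟨x, hx, hcx, hkx, hvx⟩
      · rcases (hd1get _ _).mp h1 with ⟨rfl, rfl⟩
        exact mem_achStep.mpr (Or.inl ⟨rfl, rfl⟩)
      · have hxget : d.get? x.1 = some x.2 := PySem.Dict.get?_of_mem_items d hx hnd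
        exact mem_achStep.mpr (Or.inr (Or.inr ⟨x.1, x.2, hA1 _ _ hxget, hcx, hkx.symm, hvx.symm⟩))
  · -- completeness
    intro w l hmem
    rcases mem_achStep.mp hmem with ⟨hw, rfl⟩ | hP | ⟨w0, l0, hP, hc, rfl, rfl⟩
    · have h1 : d1.get? w = some 1 := (hd1get _ _).mpr ⟨hw, rfl⟩
      obtain ⟨l1, hl1, hN⟩ := foldG_mono d.items (fun wl : Int × Int => wl.1 > a * 6)
        (fun wl => wl.1 + a) (fun wl => wl.2 + 1) d1 w 1 h1
      rw [← hNfold] at hN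
      have hitem : (w, l1) ∈ N.items := PySem.Dict.mem_items_of_get?_eq_some _ hN
      obtain ⟨l', hl', hfin⟩ := foldG_complete N.items (fun _ : Int × Int => False)
        (fun wl => wl.1) (fun wl => wl.2) d (w, l1) hitem (by simp)
      exact ⟨l', hfin, by omega⟩
    · obtain ⟨l0, hg0, hl0⟩ := hA2 _ _ hP
      obtain ⟨l', hl', hfin⟩ := foldG_mono N.items (fun _ : Int × Int => False)
        (fun wl => wl.1) (fun wl => wl.2) d w l0 hg0
      exact ⟨l', hfin, by omega⟩
    · obtain ⟨l0', hg0, hl0⟩ := hA2 _ _ hP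
      have hitem0 : (w0, l0') ∈ d.items := PySem.Dict.mem_items_of_get?_eq_some _ hg0
      obtain ⟨l1, hl1, hN⟩ := foldG_complete d.items (fun wl : Int × Int => wl.1 > a * 6)
        (fun wl => wl.1 + a) (fun wl => wl.2 + 1) d1 (w0, l0') hitem0 hc
      rw [← hNfold] at hN
      have hitem1 : (w0 + a, l1) ∈ N.items := PySem.Dict.mem_items_of_get?_eq_some _ hN
      obtain ⟨l', hl', hfin⟩ := foldG_complete N.items (fun _ : Int × Int => False)
        (fun wl => wl.1) (fun wl => wl.2) d (w0 + a, l1) hitem1 (by simp)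
      exact ⟨l', hfin, by omega⟩
lemma extendB_get_lt (a : Int) : ∀ (rest : List Int) (b : Int) (k : Nat) (x y : Int),
    (b :: rest)[k]? = some x → rest[k]? = some y →
    (extendB a (b :: rest))[k]? = some (if x ≤ 6 * a then min y (x + a) else y) := by
  intro rest
  induction rest with
  | nil => intro b k x y _ hy; simp at hy
  | cons c rest ih =>
    intro b k x y hx hy
    cases k with
    | zero =>
      simp only [List.getElem?_cons_zero, Option.some_inj] at hx hy
      subst hx; subst hy
      simp [extendB]
    | succ k =>
      simp only [List.getElem?_cons_succ] at hx hy
      have := ih c k x y hx hy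
      simpa [extendB] using this

lemma extendB_get_last (a : Int) : ∀ (rest : List Int) (b x : Int),
    (b :: rest)[rest.length]? = some x →
    (extendB a (b :: rest))[rest.length]? = if x ≤ 6 * a then some (x + a) else none := by
  intro rest
  induction rest with
  | nil =>
    intro b x hx
    simp only [List.length_nil, List.getElem?_cons_zero, Option.some_inj] at hx
    subst hx
    by_cases h : b ≤ 6 * a <;> simp [extendB, h]
  | cons c rest ih =>
    intro b x hx
    simp only [List.length_cons, List.getElem?_cons_succ] at hx
    have := ih c x hx
    simpa [extendB] using this

lemma extendB_get_none (a : Int) : ∀ (rest : List Int) (b : Int) (k : Nat),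
    rest.length < k → (extendB a (b :: rest))[k]? = none := by
  intro rest
  induction rest with
  | nil =>
    intro b k hk
    by_cases h : b ≤ 6 * a
    · simp [extendB, h]
      omega
    · simp [extendB, h]
  | cons c rest ih =>
    intro b k hk
    simp only [List.length_cons] at hk
    cases k with
    | zero => omega
    | succ k =>
      have := ih c k (by omega)
      simpa [extendB] using this

lemma extendB_length (a : Int) : ∀ (rest : List Int) (b x : Int),
    (b :: rest)[rest.length]? = some x →
    (extendB a (b :: rest)).length = if x ≤ 6 * a then rest.length + 1 else rest.length := by
  intro rest
  induction rest with
  | nil =>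
    intro b x hx
    simp only [List.length_nil, List.getElem?_cons_zero, Option.some_inj] at hx
    subst hx
    by_cases h : b ≤ 6 * a <;> simp [extendB, h]
  | cons c rest ih =>
    intro b x hx
    simp only [List.length_cons, List.getElem?_cons_succ] at hx
    have := ih c x hx
    simp only [extendB, List.length_cons, this]
    by_cases h : x ≤ 6 * a <;> simp [h]

lemma invB_step {best : List Int} {P : List (Int × Int)} (h : InvB best P) (a : Int) :
    InvB (stepB best a) (achStep P a) := by
  obtain ⟨hB1, hB2⟩ := h
  cases best with
  | nil =>
    have hPe : ∀ w l : Int, (w, l) ∈ P → False := by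
      intro w l hm
      have := hB2 w l hm
      simp at this
      omega
    constructor
    · intro k w hk
      cases k with
      | zero =>
        simp only [stepB, List.getElem?_cons_zero, Option.some_inj] at hk
        subst hk
        refine ⟨mem_achStep.mpr (Or.inl ⟨rfl, rfl⟩), ?_⟩
        intro w' hw'
        rcases mem_achStep.mp hw' with ⟨rfl, _⟩ | hP | ⟨w0, l0, hP, _, _, _⟩
        · exact le_refl _
        · exact absurd hP (fun hh => hPe _ _ hh)
        · exact absurd hP (fun hh => hPe _ _ hh)
      | succ k => simp [stepB] at hk
    · intro w l hm
      rcases mem_achStep.mp hm with ⟨rfl, rfl⟩ | hP | ⟨w0, l0, hP, _, _, _⟩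
      · simp [stepB]
      · exact absurd hP (fun hh => hPe _ _ hh)
      · exact absurd hP (fun hh => hPe _ _ hh)
  | cons b rest =>
    have hb0 : MinWt P 1 b := by
      have := hB1 0 b (by simp)
      norm_num at this
      exact this
    have hxlt : rest.length < (b :: rest).length := by simp
    set x := (b :: rest)[rest.length]'hxlt with hxdef
    have hx : (b :: rest)[rest.length]? = some x := List.getElem?_eq_getElem hxlt
    have hxmin : MinWt P ((rest.length : Int) + 1) x := hB1 rest.length x hx
    have hlen := extendB_length a rest b x hx
    have hstep : stepB (b :: rest) a = min b a :: extendB a (b :: rest) := rfl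
    constructor
    · intro k w hk
      rw [hstep] at hk
      cases k with
      | zero =>
        simp only [List.getElem?_cons_zero, Option.some_inj] at hk
        subst hk
        rw [show ((0 : Nat) : Int) + 1 = 1 from rfl]
        refine ⟨?_, ?_⟩
        · rcases min_choice b a with hm | hm <;> rw [hm]
          · exact mem_achStep.mpr (Or.inr (Or.inl hb0.1))
          · exact mem_achStep.mpr (Or.inl ⟨rfl, rfl⟩)
        · intro w' hw'
          rcases mem_achStep.mp hw' with ⟨hwa, _⟩ | hP | ⟨w0, l0, hP, _, _, hl0⟩
          · rw [hwa]; exact min_le_right b a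
          · exact le_trans (min_le_left b a) (hb0.2 w' hP)
          · exfalso
            have := (hB2 w0 l0 hP).1
            omega
      | succ k =>
        simp only [List.getElem?_cons_succ] at hk
        rcases lt_trichotomy k rest.length with hlt | heq | hgt
        · -- middle positions
          have hklt : k < (b :: rest).length := by simp only [List.length_cons]; omega
          have hX : (b :: rest)[k]? = some ((b :: rest)[k]'hklt) := List.getElem?_eq_getElem hklt
          have hY : rest[k]? = some (rest[k]'hlt) := List.getElem?_eq_getElem hlt
          set X := (b :: rest)[k]'hklt
          set Y := rest[k]'hlt
          have hXmin : MinWt P ((k : Int) + 1) X := hB1 k X hX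
          have hYmin : MinWt P ((k : Int) + 2) Y := by
            have h' := hB1 (k + 1) Y (by rwa [List.getElem?_cons_succ])
            have hcast : ((k + 1 : Nat) : Int) + 1 = (k : Int) + 2 := by push_cast; ring
            rwa [hcast] at h'
          rw [extendB_get_lt a rest b k X Y hX hY] at hk
          have hgoal : ((k + 1 : Nat) : Int) + 1 = (k : Int) + 2 := by push_cast; ring
          rw [hgoal]
          by_cases hX6 : X ≤ 6 * a
          · rw [if_pos hX6, Option.some_inj] at hk
            subst hk
            refine ⟨?_, ?_⟩
            · rcases min_choice Y (X + a) with hm | hm <;> rw [hm]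
              · exact mem_achStep.mpr (Or.inr (Or.inl hYmin.1))
              · refine mem_achStep.mpr (Or.inr (Or.inr ⟨X, (k : Int) + 1, hXmin.1, by omega, rfl, by ring⟩))
            · intro w' hw'
              rcases mem_achStep.mp hw' with ⟨_, hl⟩ | hP | ⟨w0, l0, hP, hc0, rfl, hl0⟩
              · omega
              · exact le_trans (min_le_left _ _) (hYmin.2 w' hP)
              · have hl0' : l0 = (k : Int) + 1 := by omega
                rw [hl0'] at hP
                exact le_trans (min_le_right _ _) (by have := hXmin.2 w0 hP; omega)
          · rw [if_neg hX6, Option.some_inj] at hk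
            subst hk
            refine ⟨mem_achStep.mpr (Or.inr (Or.inl hYmin.1)), ?_⟩
            intro w' hw'
            rcases mem_achStep.mp hw' with ⟨_, hl⟩ | hP | ⟨w0, l0, hP, hc0, rfl, hl0⟩
            · omega
            · exact hYmin.2 w' hP
            · have hl0' : l0 = (k : Int) + 1 := by omega
              rw [hl0'] at hP
              have := hXmin.2 w0 hP
              omega
        · -- last (appended) position
          subst heq
          rw [extendB_get_last a rest b x hx] at hk
          by_cases hx6 : x ≤ 6 * a
          · rw [if_pos hx6, Option.some_inj] at hk
            subst hk
            refine ⟨?_, ?_⟩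
            · exact mem_achStep.mpr (Or.inr (Or.inr ⟨x, (rest.length : Int) + 1, hxmin.1,
                by omega, rfl, by push_cast; ring⟩))
            · intro w' hw'
              rcases mem_achStep.mp hw' with ⟨_, hl⟩ | hP | ⟨w0, l0, hP, hc0, rfl, hl0⟩
              · exfalso; push_cast at hl; omega
              · exfalso
                have := (hB2 w' _ hP).2
                simp only [List.length_cons] at this
                push_cast at this
                omega
              · have hl0' : l0 = (rest.length : Int) + 1 := by push_cast at hl0; omega
                rw [hl0'] at hP
                have := hxmin.2 w0 hP
                omega
          · rw [if_neg hx6] at hk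
            cases hk
        · -- beyond the end
          rw [extendB_get_none a rest b k hgt] at hk
          cases hk
    · intro w l hm
      have hlen2 : (stepB (b :: rest) a).length = 1 + (extendB a (b :: rest)).length := by
        rw [hstep]; simp only [List.length_cons]; omega
      rcases mem_achStep.mp hm with ⟨_, rfl⟩ | hP | ⟨w0, l0, hP, hc0, rfl, rfl⟩
      · constructor
        · omega
        · rw [hlen2]; push_cast; omega
      · have := hB2 w l hP
        simp only [List.length_cons] at this
        refine ⟨this.1, ?_⟩
        rw [hlen2, hlen]
        split <;> push_cast at this ⊢ <;> omega
      · have h0 := hB2 w0 l0 hP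
        simp only [List.length_cons] at h0
        refine ⟨by omega, ?_⟩
        by_cases hl0 : l0 ≤ (rest.length : Int)
        · rw [hlen2, hlen]
          split <;> push_cast <;> omega
        · have hl0' : l0 = (rest.length : Int) + 1 := by push_cast at h0; omega
          rw [hl0'] at hP
          have hx6 : x ≤ 6 * a := by
            have := hxmin.2 w0 hP
            omega
          rw [hlen2, hlen, if_pos hx6]
          push_cast
          omega
lemma invA_foldl : ∀ (ants : List Int) (d : PySem.Dict Int Int) (P : List (Int × Int)),
    InvA d P → InvA (ants.foldl stepA d) (ants.foldl achStep P) := by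
  intro ants
  induction ants with
  | nil => intro d P h; exact h
  | cons a t ih => intro d P h; exact ih _ _ (invA_step h a)

lemma invB_foldl : ∀ (ants : List Int) (best : List Int) (P : List (Int × Int)),
    InvB best P → InvB (ants.foldl stepB best) (ants.foldl achStep P) := by
  intro ants
  induction ants with
  | nil => intro b P h; exact h
  | cons a t ih => intro b P h; exact ih _ _ (invB_step h a)

lemma ach_nonempty : ∀ (t : List Int) (P : List (Int × Int)) (a : Int),
    ∃ p, p ∈ (a :: t).foldl achStep P := by
  intro t
  induction t with
  | nil => intro P a; exact ⟨(a, 1), by simp [achStep]⟩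
  | cons b t ih => intro P a; simpa using ih (achStep P a) b
theorem main_equiv (ants : List Int) (hne : ants ≠ []) :
    getResultOld ants = getResultOld_alt ants := by
  cases ants with
  | nil => exact absurd rfl hne
  | cons a t =>
    set d : PySem.Dict Int Int := (a :: t).foldl stepA PySem.Dict.empty with hd
    set best : List Int := (a :: t).foldl stepB [] with hbest
    set P : List (Int × Int) := (a :: t).foldl achStep [] with hP
    have hInvA : InvA d P := by
      refine invA_foldl _ _ _ ⟨PySem.Dict.nodup_keys_empty, ?_, ?_⟩
      · intro w l hg
        rw [PySem.Dict.get?_empty] at hg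
        cases hg
      · intro w l hm
        cases hm
    have hInvB : InvB best P := by
      refine invB_foldl _ _ _ ⟨?_, ?_⟩
      · intro k w hk
        simp at hk
      · intro w l hm
        cases hm
    obtain ⟨hnd, hA1, hA2⟩ := hInvA
    obtain ⟨hB1, hB2⟩ := hInvB
    obtain ⟨⟨w0, l0⟩, hp0⟩ := ach_nonempty t [] a
    obtain ⟨l0', hg0, hl0⟩ := hA2 w0 l0 hp0
    have hitem0 : (w0, l0') ∈ d.items := PySem.Dict.mem_items_of_get?_eq_some _ hg0
    cases hmax : PySem.List.max? d.items (fun wl => wl.2) with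
    | none =>
      rw [PySem.List.max?_eq_none_iff] at hmax
      rw [hmax] at hitem0
      cases hitem0
    | some m =>
      obtain ⟨mw, ml⟩ := m
      have hA : getResultOld (a :: t) = d.getD mw 0 := by
        show (match PySem.List.max? d.items (fun wl => wl.2) with
          | some best => d.getD best.1 0 | none => 0) = d.getD mw 0
        rw [hmax]
      have hmem : (mw, ml) ∈ d.items := PySem.List.max?_mem hmax
      have hgetm : d.get? mw = some ml := PySem.Dict.get?_of_mem_items d hmem hnd
      have hmlP : (mw, ml) ∈ P := hA1 mw ml hgetm
      have hmlle : ml ≤ (best.length : Int) := (hB2 mw ml hmlP).2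
      have hL1 : 1 ≤ best.length := by
        have := hB2 w0 l0 hp0
        omega
      have hlt : best.length - 1 < best.length := by omega
      have hmin : MinWt P (((best.length - 1 : Nat) : Int) + 1) (best[best.length - 1]'hlt) :=
        hB1 (best.length - 1) _ (List.getElem?_eq_getElem hlt)
      have hcast : ((best.length - 1 : Nat) : Int) + 1 = (best.length : Int) := by omega
      rw [hcast] at hmin
      obtain ⟨l'', hg'', hle''⟩ := hA2 _ _ hmin.1
      have hitem'' : (best[best.length - 1]'hlt, l'') ∈ d.items :=
        PySem.Dict.mem_items_of_get?_eq_some _ hg''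
      have hmax'' := PySem.List.max?_isMax hmax _ hitem''
      simp only at hmax''
      have hml : ml = (best.length : Int) := by omega
      rw [hA, PySem.Dict.getD_of_mem_items d hmem hnd 0, hml]
      rfl

-- ===== VERDICT (by name: the statement is the Claim_ definition above) =====
theorem getResultOld_spec : Claim_equal_getResultOld := by
  intro ants _ hpre
  exact main_equiv ants hpre
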